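-- pv_equiv track=rewrite | github.com/Unique-AG/ai | unique_toolkit/unique_toolkit/services/retrieve_visible_file_tree.py | display_path_tree
-- ===== SOURCE A (Python) =====
-- def display_path_tree(paths: list[list[str]], root_name: str = ".") -> str:
--     """
--     Display a list of path lists as a tree (like the Linux `tree` command).
--
--     Each sublist represents a path of folder names from root to leaf.
--     Paths are merged into a shared tree structure and printed with
--     unicode box-drawing characters (├──, └──, │).
--
--     Args:
--         paths: List of path lists, e.g. [["a", "b"], ["a", "c"], ["d"]]
--         root_name: Name to show for the root node. Defaults to ".".
--
--     Returns:
--         String representation of the tree.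
--
--     Example:
--         >>> display_path_tree([["docs", "api"], ["docs", "guides"], ["src"]])
--         .
--         ├── docs
--         │   ├── api
--         │   └── guides
--         └── src
--     """
--     if not paths:
--         return root_name
--
--     # Build tree as nested dict: {name: {children...}}
--     tree: dict[str, dict] = {}
--     for path in paths:
--         if not path:
--             continue
--         current = tree
--         for segment in path:
--             if segment:  # skip empty strings
--                 current = current.setdefault(segment, {})
--
--     def _render(node: dict, prefix: str = "") -> list[str]:
--         lines: list[str] = []
--         folders = sorted(k for k in node if node[k])
--         files = sorted(k for k in node if not node[k])
--         children = folders + files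
--         for i, name in enumerate(children):
--             last = i == len(children) - 1
--             connector = "└── " if last else "├── "
--             lines.append(prefix + connector + name)
--             child_prefix = prefix + ("    " if last else "│   ")
--             lines.extend(_render(node[name], child_prefix))
--         return lines
--
--     lines = [root_name] + _render(tree)
--     return "\n".join(lines)
-- ===== SOURCE B (Python) =====
-- def display_path_tree(paths: list[list[str]], root_name: str = ".") -> str:
--     """Render path lists as a box-drawing tree by recursive grouping of the
--     path lists themselves (no intermediate trie is built)."""
--     if not paths:
--         return root_name
--     norm = [q for q in ([s for s in p if s] for p in paths) if q]
--     return "\n".join([root_name] + _walk(norm, ""))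
--
--
-- def _walk(ps: list[list[str]], prefix: str) -> list[str]:
--     # ps: non-empty path lists (no empty segments); group by first segment.
--     names = list(dict.fromkeys(p[0] for p in ps))
--
--     def is_folder(c):
--         return any(len(p) > 1 for p in ps if p[0] == c)
--
--     children = sorted(c for c in names if is_folder(c)) + sorted(
--         c for c in names if not is_folder(c)
--     )
--     last_i = len(children) - 1
--     lines = []
--     for i, name in enumerate(children):
--         lines.append(prefix + ("└── " if i == last_i else "├── ") + name)
--         rest = [p[1:] for p in ps if p[0] == name and len(p) > 1]
--         lines.extend(_walk(rest, prefix + ("    " if i == last_i else "│   ")))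
--     return lines
-- ===== Notes on version B (the rewrite author's own statement) =====
-- stated objective: alternative
-- what changed: B drops A's nested-dict trie entirely: it normalises the path lists once and renders by recursive grouping of the path lists themselves (group tails by first segment, a child is a folder iff some of its paths continues), instead of building and then walking a mutable trie.
import Mathlib
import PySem

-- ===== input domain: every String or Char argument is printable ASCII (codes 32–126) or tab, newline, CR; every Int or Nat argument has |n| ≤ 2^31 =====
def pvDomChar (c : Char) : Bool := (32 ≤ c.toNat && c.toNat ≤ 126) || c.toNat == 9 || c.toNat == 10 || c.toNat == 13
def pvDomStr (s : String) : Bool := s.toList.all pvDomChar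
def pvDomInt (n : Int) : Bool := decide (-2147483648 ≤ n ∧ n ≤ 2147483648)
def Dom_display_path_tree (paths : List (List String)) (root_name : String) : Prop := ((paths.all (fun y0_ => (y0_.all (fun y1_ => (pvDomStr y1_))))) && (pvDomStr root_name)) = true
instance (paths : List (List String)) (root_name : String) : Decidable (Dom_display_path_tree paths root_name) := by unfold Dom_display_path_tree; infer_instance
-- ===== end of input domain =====

-- B renders the tree by recursive grouping of the path lists themselves instead of
-- first building a nested-dict trie (objective: alternative decomposition).

-- ===== PORT A =====
-- A's nested dict {name: {children...}} as a mutual inductive (no nested inductives).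
mutual
inductive PTrie : Type
  | mk : PChildren → PTrie
inductive PChildren : Type
  | nil : PChildren
  | cons : String → PTrie → PChildren → PChildren
end

-- insert the rest of the path under key s: existing subtree is updated with fUpd,
-- a missing key gets the fresh subtree fNew (= Python's setdefault + recursive walk)
def childUpd (s : String) (fNew : PTrie) (fUpd : PTrie → PTrie) : PChildren → PChildren
  | .nil => .cons s fNew .nil
  | .cons k t tl =>
      if k = s then .cons k (fUpd t) tl
      else .cons k t (childUpd s fNew fUpd tl)

-- the 'for segment in path: if segment: current = current.setdefault(segment, {})' walk,
-- returning the updated tree (functional rendering of Python's in-place mutation)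
def trieInsert : PTrie → List String → PTrie
  | t, [] => t
  | .mk ch, s :: rest =>
      if s = "" then trieInsert (.mk ch) rest
      else .mk (childUpd s (trieInsert (.mk .nil) rest) (fun t => trieInsert t rest) ch)

def childList : PChildren → List (String × PTrie)
  | .nil => []
  | .cons k t tl => (k, t) :: childList tl

-- truthiness test 'node[k]' on a nested dict
def isEmptyNode : PTrie → Bool
  | .mk .nil => true
  | .mk (.cons _ _ _) => false

-- 'node[name]' (the name is always present when _render uses it)
def getNode : PChildren → String → PTrie
  | .nil, _ => .mk .nil
  | .cons k t tl, c => if k = c then t else getNode tl c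

-- _render's loop over 'enumerate(children)' as a foldl on the lines accumulator;
-- fuel (never exhausted when called from display_path_tree) makes the recursion
-- through the looked-up subtree structural
def renderA : Nat → PTrie → String → List String
  | 0, _, _ => []
  | f + 1, .mk ch, pre =>
      let kvs := childList ch
      let folders := PySem.List.sorted ((kvs.filter (fun kv => !isEmptyNode kv.2)).map (·.1)) (fun x => x) false
      let files := PySem.List.sorted ((kvs.filter (fun kv => isEmptyNode kv.2)).map (·.1)) (fun x => x) false
      let children := folders ++ files
      (PySem.List.enumerate children).foldl (fun lines (i, name) =>
        let last := i == (children.length : Int) - 1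
        let connector := if last then "└── " else "├── "
        let childPre := pre ++ (if last then "    " else "│   ")
        lines ++ [pre ++ connector ++ name] ++ renderA f (getNode ch name) childPre) []

def display_path_tree (paths : List (List String)) (root_name : String) : String :=
  if paths = [] then root_name
  else
    let tree := paths.foldl (fun t p => if p = [] then t else trieInsert t p) (.mk .nil)
    PySem.Str.join "\n" (root_name :: renderA ((paths.map List.length).sum + 1) tree "")

-- ===== PORT B =====
def normB (paths : List (List String)) : List (List String) :=
  (paths.map (fun p => p.filter (fun s => decide (s ≠ "")))).filter (fun q => decide (q ≠ []))

def isFolderB (ps : List (List String)) (c : String) : Bool :=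
  ps.any (fun p => p.headD "" == c && decide (1 < p.length))

-- rest = [p[1:] for p in ps if p[0] == name and len(p) > 1]   (p[1:] = tail)
def groupB (ps : List (List String)) (c : String) : List (List String) :=
  (ps.filter (fun p => p.headD "" == c && decide (1 < p.length))).map List.tail

def walkB : Nat → List (List String) → String → List String
  | 0, _, _ => []
  | f + 1, ps, pre =>
      let names := PySem.List.dedup (ps.map (fun p => p.headD ""))
      let children :=
        PySem.List.sorted (names.filter (fun c => isFolderB ps c)) (fun x => x) false ++
        PySem.List.sorted (names.filter (fun c => !isFolderB ps c)) (fun x => x) false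
      (PySem.List.enumerate children).foldl (fun lines (i, name) =>
        lines ++ [pre ++ (if i == (children.length : Int) - 1 then "└── " else "├── ") ++ name] ++
          walkB f (groupB ps name)
            (pre ++ (if i == (children.length : Int) - 1 then "    " else "│   "))) []

def display_path_tree_alt (paths : List (List String)) (root_name : String) : String :=
  if paths = [] then root_name
  else
    PySem.Str.join "\n"
      (root_name :: walkB ((paths.map List.length).sum + 1) (normB paths) "")

-- ===== PRECONDITION & SPEC =====
def Spec_display_path_tree (paths : List (List String)) (root_name : String) (out : String) : Prop := out = display_path_tree_alt paths root_name
instance (paths : List (List String)) (root_name : String) (out : String) : Decidable (Spec_display_path_tree paths root_name out) := by unfold Spec_display_path_tree; infer_instance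

-- ===== CLAIM (what is proved, stated in full; the proofs are below) =====
def Claim_equal_display_path_tree : Prop := ∀ (paths : List (List String)) (root_name : String), Dom_display_path_tree paths root_name → Spec_display_path_tree paths root_name (display_path_tree paths root_name)

-- ===== LEMMAS AND PROOFS =====

def chOf : PTrie → PChildren
  | .mk ch => ch

def lookupC : PChildren → String → Option PTrie
  | .nil, _ => none
  | .cons k t tl, c => if k = c then some t else lookupC tl c

def keysC (ch : PChildren) : List String := (childList ch).map (·.1)

theorem chOf_mk (ch : PChildren) : chOf (.mk ch) = ch := rfl

theorem lookupC_nil (c : String) : lookupC .nil c = none := rfl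

-- proof-side name for the child update trieInsert performs at one level
def childInsert (ch : PChildren) (s : String) (rest : List String) : PChildren :=
  childUpd s (trieInsert (.mk .nil) rest) (fun t => trieInsert t rest) ch

def headsOf (ps : List (List String)) : List String := ps.map (fun p => p.headD "")

def PNorm (ps : List (List String)) : Prop := ∀ p ∈ ps, p ≠ [] ∧ ∀ s ∈ p, s ≠ ""

def sumLen (ps : List (List String)) : Nat := (ps.map List.length).sum

theorem trie_eta (t : PTrie) : t = .mk (chOf t) := by cases t; rfl

theorem trieInsert_nil (t : PTrie) : trieInsert t [] = t := by
  cases t; simp [trieInsert]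

theorem trieInsert_cons (ch : PChildren) (s : String) (rest : List String) (hs : s ≠ "") :
    trieInsert (.mk ch) (s :: rest) = .mk (childInsert ch s rest) := by
  simp [trieInsert, hs, childInsert]

theorem childInsert_congr (s : String) {rest rest' : List String}
    (h : ∀ t, trieInsert t rest = trieInsert t rest') :
    ∀ ch, childInsert ch s rest = childInsert ch s rest' := by
  intro ch
  unfold childInsert
  rw [show (fun t => trieInsert t rest) = (fun t => trieInsert t rest') from funext h,
    h (.mk .nil)]

theorem trieInsert_filter : ∀ (p : List String) (t : PTrie),
    trieInsert t p = trieInsert t (p.filter (fun s => decide (s ≠ ""))) := by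
  intro p
  induction p with
  | nil => intro t; rfl
  | cons s rest ih =>
    intro t
    cases t with | mk ch =>
    by_cases hs : s = ""
    · subst hs
      rw [List.filter_cons_of_neg (by simp)]
      rw [← ih (.mk ch)]
      simp [trieInsert]
    · rw [List.filter_cons_of_pos (by simp [hs])]
      rw [trieInsert_cons ch s rest hs, trieInsert_cons ch s _ hs]
      exact congrArg PTrie.mk (childInsert_congr s ih ch)

theorem normB_cons (p : List String) (rest : List (List String)) :
    normB (p :: rest) =
      if p.filter (fun s => decide (s ≠ "")) = [] then normB rest
      else p.filter (fun s => decide (s ≠ "")) :: normB rest := by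
  simp only [normB, List.map_cons, List.filter_cons]
  by_cases h : List.filter (fun s => decide (s ≠ "")) p = []
  · rw [if_pos h, if_neg (by simpa using h)]
  · rw [if_neg h, if_pos (by simpa using h)]

theorem foldA_eq_norm (paths : List (List String)) : ∀ t : PTrie,
    paths.foldl (fun t p => if p = [] then t else trieInsert t p) t
      = (normB paths).foldl trieInsert t := by
  induction paths with
  | nil => intro t; rfl
  | cons p rest ih =>
    intro t
    rw [List.foldl_cons, normB_cons]
    by_cases hp : p = []
    · subst hp; simp [ih]
    · simp only [if_neg hp]
      by_cases hf : p.filter (fun s => decide (s ≠ "")) = []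
      · rw [if_pos hf, trieInsert_filter p t, hf, trieInsert_nil, ih]
      · rw [if_neg hf, List.foldl_cons, trieInsert_filter p t, ih]

theorem norm_normB (paths : List (List String)) : PNorm (normB paths) := by
  intro p hp
  simp only [normB, List.mem_filter, List.mem_map, decide_eq_true_eq] at hp
  obtain ⟨⟨q, _, rfl⟩, hne⟩ := hp
  refine ⟨hne, ?_⟩
  intro s hs
  have := List.of_mem_filter hs
  simpa using this

theorem sumLen_normB_le (paths : List (List String)) :
    sumLen (normB paths) ≤ (paths.map List.length).sum := by
  induction paths with
  | nil => simp [normB, sumLen]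
  | cons p rest ih =>
    rw [normB_cons]
    have hf : (p.filter (fun s => decide (s ≠ ""))).length ≤ p.length :=
      List.length_filter_le _ _
    split_ifs with h
    · simp only [List.map_cons, List.sum_cons]; omega
    · simp only [sumLen, List.map_cons, List.sum_cons] at ih ⊢; omega

theorem lookupC_childUpd (c s : String) (n : PTrie) (f : PTrie → PTrie)
    (hn : n = f (.mk .nil)) :
    ∀ ch, lookupC (childUpd s n f ch) c =
      if s = c then some (f ((lookupC ch c).getD (.mk .nil))) else lookupC ch c
  | .nil => by by_cases hsc : s = c <;> simp [childUpd, lookupC, hsc, hn]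
  | .cons k t tl => by
    by_cases hks : k = s
    · subst hks
      by_cases hkc : k = c <;> simp [childUpd, lookupC, hkc]
    · by_cases hkc : k = c
      · subst hkc
        have hsc : ¬ s = k := fun h => hks h.symm
        simp [childUpd, lookupC, hks, hsc]
      · simp [childUpd, lookupC, hks, hkc, lookupC_childUpd c s n f hn tl]

theorem lookupC_childInsert (c s : String) (rest : List String) : ∀ ch,
    lookupC (childInsert ch s rest) c =
      if s = c then some (trieInsert ((lookupC ch c).getD (.mk .nil)) rest)
      else lookupC ch c := by
  intro ch
  unfold childInsert
  exact lookupC_childUpd c s (trieInsert (.mk .nil) rest) (fun t => trieInsert t rest) rfl ch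

theorem lookupC_trieInsert_cons (ch : PChildren) (s : String) (rest : List String) (c : String)
    (hs : s ≠ "") :
    lookupC (chOf (trieInsert (.mk ch) (s :: rest))) c =
      if s = c then some (trieInsert ((lookupC ch c).getD (.mk .nil)) rest)
      else lookupC ch c := by
  rw [trieInsert_cons ch s rest hs]
  exact lookupC_childInsert c s rest ch

theorem headsOf_cons (p : List String) (rest : List (List String)) :
    headsOf (p :: rest) = p.headD "" :: headsOf rest := rfl

theorem sumLen_cons (p : List String) (rest : List (List String)) :
    sumLen (p :: rest) = p.length + sumLen rest := by simp [sumLen]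

theorem groupB_cons (p : List String) (rest : List (List String)) (c : String) :
    groupB (p :: rest) c =
      if (p.headD "" == c && decide (1 < p.length)) = true then p.tail :: groupB rest c
      else groupB rest c := by
  simp only [groupB, List.filter_cons]
  split_ifs <;> simp

theorem groupB_cons' (s : String) (tl : List String) (rest : List (List String)) (c : String) :
    groupB ((s :: tl) :: rest) c =
      if s = c ∧ tl ≠ [] then tl :: groupB rest c else groupB rest c := by
  rw [groupB_cons]
  by_cases hsc : s = c
  · subst hsc
    cases tl with
    | nil => simp
    | cons a b =>
      have hlen : 1 < (s :: a :: b).length := by simp only [List.length_cons]; omega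
      simp
  · simp [fun h : (s::tl).headD "" = c => hsc h]

theorem groupB_eq_nil_of_not_mem (ps : List (List String)) (c : String)
    (h : c ∉ headsOf ps) : groupB ps c = [] := by
  have hall : ∀ p ∈ ps, ¬ (p.headD "" == c && decide (1 < p.length)) = true := by
    intro p hp hpred
    simp only [Bool.and_eq_true, beq_iff_eq, decide_eq_true_eq] at hpred
    exact h (by
      rw [← hpred.1]
      exact List.mem_map_of_mem hp)
  have hnil : ps.filter (fun p => p.headD "" == c && decide (1 < p.length)) = [] :=
    List.filter_eq_nil_iff.mpr hall
  simp only [groupB]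
  rw [hnil]
  rfl

theorem lookup_fold (c : String) : ∀ (ps : List (List String)) (t : PTrie), PNorm ps →
    lookupC (chOf (ps.foldl trieInsert t)) c =
      if c ∈ headsOf ps then
        some ((groupB ps c).foldl trieInsert ((lookupC (chOf t) c).getD (.mk .nil)))
      else lookupC (chOf t) c := by
  intro ps
  induction ps with
  | nil => intro t _; simp [headsOf]
  | cons p rest ih =>
    intro t hN
    obtain ⟨hpne, hseg⟩ := hN p (by simp)
    obtain ⟨s, tl, rfl⟩ := List.exists_cons_of_ne_nil hpne
    have hs : s ≠ "" := hseg s (by simp)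
    have hNr : PNorm rest := fun q hq => hN q (by simp [hq])
    rw [List.foldl_cons, ih _ hNr]
    cases t with | mk ch =>
    rw [lookupC_trieInsert_cons ch s tl c hs, groupB_cons', headsOf_cons]
    simp only [chOf_mk, List.headD_cons]
    by_cases hsc : s = c
    · subst hsc
      by_cases htl : tl = []
      · subst htl
        by_cases hc : s ∈ headsOf rest
        · simp [hc, trieInsert_nil]
        · simp [hc, groupB_eq_nil_of_not_mem rest s hc, trieInsert_nil]
      · by_cases hc : s ∈ headsOf rest
        · simp [hc, htl]
        · simp [hc, htl, groupB_eq_nil_of_not_mem rest s hc]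
    · have hcs : ¬ c = s := fun h => hsc h.symm
      by_cases hc : c ∈ headsOf rest
      · simp [hc, hsc, hcs]
      · simp [hc, hsc, hcs]

theorem keysC_cons (k : String) (t : PTrie) (tl : PChildren) :
    keysC (.cons k t tl) = k :: keysC tl := rfl

theorem keysC_childUpd (s : String) (n : PTrie) (f : PTrie → PTrie) :
    ∀ ch, keysC (childUpd s n f ch) =
      if s ∈ keysC ch then keysC ch else keysC ch ++ [s]
  | .nil => by simp [childUpd, keysC, childList]
  | .cons k t tl => by
    by_cases hks : k = s
    · subst hks
      simp [childUpd, keysC_cons]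
    · have hsk : ¬ s = k := fun h => hks h.symm
      simp only [childUpd, if_neg hks, keysC_cons, keysC_childUpd s n f tl]
      by_cases hmem : s ∈ keysC tl
      · simp [hmem, List.mem_cons]
      · simp [hmem, List.mem_cons, hsk]

theorem keysC_childInsert (s : String) (rest : List String) (ch : PChildren) :
    keysC (childInsert ch s rest) =
      if s ∈ keysC ch then keysC ch else keysC ch ++ [s] :=
  keysC_childUpd s (trieInsert (.mk .nil) rest) (fun t => trieInsert t rest) ch

theorem nodup_keysC_fold : ∀ (ps : List (List String)) (t : PTrie), PNorm ps →
    (keysC (chOf t)).Nodup → (keysC (chOf (ps.foldl trieInsert t))).Nodup := by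
  intro ps
  induction ps with
  | nil => intro t _ h; exact h
  | cons p rest ih =>
    intro t hN h
    obtain ⟨hpne, hseg⟩ := hN p (by simp)
    obtain ⟨s, tl, rfl⟩ := List.exists_cons_of_ne_nil hpne
    have hs : s ≠ "" := hseg s (by simp)
    have hNr : PNorm rest := fun q hq => hN q (by simp [hq])
    rw [List.foldl_cons]
    apply ih _ hNr
    cases t with | mk ch =>
    rw [trieInsert_cons ch s tl hs]
    show (keysC (childInsert ch s tl)).Nodup
    rw [keysC_childInsert]
    split_ifs with hmem
    · exact h
    · simp only [chOf_mk] at h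
      rw [List.nodup_append]
      refine ⟨h, List.nodup_singleton s, ?_⟩
      intro a ha b hb
      rw [List.mem_singleton] at hb
      subst hb
      exact fun h' => hmem (h' ▸ ha)

theorem mem_childList_iff (c : String) (u : PTrie) : ∀ ch, (keysC ch).Nodup →
    ((c, u) ∈ childList ch ↔ lookupC ch c = some u)
  | .nil => by intro _; simp [childList, lookupC]
  | .cons k t tl => by
    intro h
    rw [keysC_cons] at h
    obtain ⟨h1, h2⟩ := List.nodup_cons.mp h
    simp only [childList, List.mem_cons, lookupC]
    by_cases hkc : k = c
    · subst hkc
      constructor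
      · rintro (heq | hmem)
        · have hut : u = t := congrArg Prod.snd heq
          simp [hut]
        · exact absurd (List.mem_map_of_mem (f := fun x => x.1) hmem) h1
      · intro hl
        rw [if_pos rfl, Option.some_inj] at hl
        exact Or.inl (by rw [hl])
    · simp only [if_neg hkc, Prod.mk.injEq]
      constructor
      · rintro (⟨hc, _⟩ | hmem)
        · exact absurd hc.symm hkc
        · exact (mem_childList_iff c u tl h2).mp hmem
      · intro hl
        exact Or.inr ((mem_childList_iff c u tl h2).mpr hl)

theorem isEmptyNode_iff (t : PTrie) : isEmptyNode t = true ↔ chOf t = .nil := by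
  cases t with | mk ch => cases ch <;> simp [isEmptyNode, chOf]

theorem buildT_nil_iff (ps : List (List String)) (hN : PNorm ps) :
    chOf (ps.foldl trieInsert (.mk .nil)) = .nil ↔ ps = [] := by
  constructor
  · intro h
    by_contra hne
    obtain ⟨p, ps', rfl⟩ := List.exists_cons_of_ne_nil hne
    have hc : (p.headD "") ∈ headsOf (p :: ps') := by simp [headsOf]
    have hlf := lookup_fold (p.headD "") (p :: ps') (.mk .nil) hN
    rw [if_pos hc, h] at hlf
    simp [lookupC] at hlf
  · rintro rfl; rfl

theorem getNode_eq (c : String) : ∀ ch, getNode ch c = (lookupC ch c).getD (.mk .nil)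
  | .nil => rfl
  | .cons k t tl => by
    by_cases hkc : k = c <;> simp [getNode, lookupC, hkc, getNode_eq c tl]

theorem groupB_eq_nil_iff (ps : List (List String)) (c : String) :
    groupB ps c = [] ↔ isFolderB ps c = false := by
  simp [groupB, isFolderB, List.filter_eq_nil_iff, List.any_eq_false]

theorem norm_groupB (ps : List (List String)) (c : String) (hN : PNorm ps) :
    PNorm (groupB ps c) := by
  intro q hq
  simp only [groupB, List.mem_map, List.mem_filter] at hq
  obtain ⟨p, ⟨hp, hpred⟩, rfl⟩ := hq
  simp only [Bool.and_eq_true, decide_eq_true_eq] at hpred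
  obtain ⟨_, hseg⟩ := hN p hp
  constructor
  · have h2 := hpred.2
    apply List.ne_nil_of_length_pos
    rw [List.length_tail]
    omega
  · intro s hs
    exact hseg s (List.mem_of_mem_tail hs)

theorem sumLen_groupB_le (ps : List (List String)) (c : String) :
    sumLen (groupB ps c) ≤ sumLen ps := by
  induction ps with
  | nil => simp [groupB, sumLen]
  | cons p rest ih =>
    rw [groupB_cons, sumLen_cons]
    have ht : p.tail.length ≤ p.length := by
      rw [List.length_tail]; omega
    split_ifs with h
    · rw [sumLen_cons]; omega
    · omega

theorem sumLen_groupB_lt (ps : List (List String)) (c : String) (hN : PNorm ps)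
    (hc : c ∈ headsOf ps) : sumLen (groupB ps c) < sumLen ps := by
  induction ps with
  | nil => simp [headsOf] at hc
  | cons p rest ih =>
    have hNr : PNorm rest := fun q hq => hN q (by simp [hq])
    have hpne : p ≠ [] := (hN p (by simp)).1
    have hp1 : 0 < p.length := List.length_pos_of_ne_nil hpne
    rw [groupB_cons, sumLen_cons]
    have hle := sumLen_groupB_le rest c
    rw [headsOf_cons] at hc
    by_cases hpred : (p.headD "" == c && decide (1 < p.length)) = true
    · rw [if_pos hpred, sumLen_cons]
      have h2 : 1 < p.length := by
        simp only [Bool.and_eq_true, decide_eq_true_eq] at hpred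
        exact hpred.2
      have ht : p.tail.length = p.length - 1 := List.length_tail
      omega
    · rw [if_neg hpred]
      rcases List.mem_cons.mp hc with hceq | hcr
      · omega
      · have := ih hNr hcr
        omega

theorem mem_filterA (ps : List (List String)) (hN : PNorm ps) (P : PTrie → Bool) (c : String) :
    (c ∈ ((childList (chOf (ps.foldl trieInsert (.mk .nil)))).filter
        (fun kv => P kv.2)).map (·.1)) ↔
      (c ∈ headsOf ps ∧ P ((groupB ps c).foldl trieInsert (.mk .nil)) = true) := by
  have hnd : (keysC (chOf (ps.foldl trieInsert (.mk .nil)))).Nodup :=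
    nodup_keysC_fold ps (.mk .nil) hN (by simp [keysC, childList, chOf_mk])
  have hlf := lookup_fold c ps (.mk .nil) hN
  simp only [chOf_mk, lookupC_nil, Option.getD_none] at hlf
  constructor
  · intro hmem
    obtain ⟨kv, hkv, hc⟩ := List.mem_map.mp hmem
    obtain ⟨hkvmem, hP⟩ := List.mem_filter.mp hkv
    have hpair : (c, kv.2) ∈ childList (chOf (ps.foldl trieInsert (.mk .nil))) := by
      cases kv; cases hc; exact hkvmem
    have hl := (mem_childList_iff c kv.2 _ hnd).mp hpair
    by_cases hc' : c ∈ headsOf ps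
    · rw [if_pos hc'] at hlf
      rw [hlf] at hl
      refine ⟨hc', ?_⟩
      rw [Option.some_inj.mp hl]
      exact hP
    · rw [if_neg hc'] at hlf
      rw [hlf] at hl
      exact absurd hl (by simp)
  · rintro ⟨hc', hP⟩
    rw [if_pos hc'] at hlf
    have hpair := (mem_childList_iff c ((groupB ps c).foldl trieInsert (.mk .nil)) _ hnd).mpr hlf
    exact List.mem_map.mpr ⟨(c, (groupB ps c).foldl trieInsert (.mk .nil)),
      List.mem_filter.mpr ⟨hpair, hP⟩, rfl⟩

theorem nodup_filterA (ps : List (List String)) (hN : PNorm ps) (P : PTrie → Bool) :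
    (((childList (chOf (ps.foldl trieInsert (.mk .nil)))).filter
        (fun kv => P kv.2)).map (·.1)).Nodup := by
  have hnd : (keysC (chOf (ps.foldl trieInsert (.mk .nil)))).Nodup :=
    nodup_keysC_fold ps (.mk .nil) hN (by simp [keysC, childList, chOf_mk])
  exact List.Nodup.sublist (List.Sublist.map (fun kv : String × PTrie => kv.1) List.filter_sublist) hnd

theorem folders_eq (ps : List (List String)) (hN : PNorm ps) :
    PySem.List.sorted (((childList (chOf (ps.foldl trieInsert (.mk .nil)))).filter
        (fun kv => !isEmptyNode kv.2)).map (·.1)) (fun x => x) false =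
      PySem.List.sorted ((PySem.List.dedup (ps.map (fun p => p.headD ""))).filter
        (fun c => isFolderB ps c)) (fun x => x) false := by
  apply PySem.List.sorted_eq_sorted_of_perm _ _ _ (fun a b h => h)
  rw [List.perm_ext_iff_of_nodup (nodup_filterA ps hN (fun u => !isEmptyNode u))
    (List.Nodup.filter _ (PySem.List.nodup_dedup _))]
  intro c
  rw [mem_filterA ps hN (fun u => !isEmptyNode u) c, List.mem_filter, PySem.List.mem_dedup]
  show _ ↔ c ∈ headsOf ps ∧ _
  constructor
  · rintro ⟨hc, hP⟩
    refine ⟨hc, ?_⟩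
    simp only [Bool.not_eq_true'] at hP
    have : ¬ chOf ((groupB ps c).foldl trieInsert (.mk .nil)) = .nil := by
      intro h
      rw [(isEmptyNode_iff _).mpr h] at hP
      exact absurd hP (by decide)
    have hg : groupB ps c ≠ [] := fun h => this ((buildT_nil_iff _ (norm_groupB ps c hN)).mpr h)
    cases hfb : isFolderB ps c
    · exact absurd ((groupB_eq_nil_iff ps c).mpr hfb) hg
    · rfl
  · rintro ⟨hc, hQ⟩
    refine ⟨hc, ?_⟩
    have hg : groupB ps c ≠ [] := fun h => by
      rw [(groupB_eq_nil_iff ps c).mp h] at hQ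
      exact absurd hQ (by decide)
    have : chOf ((groupB ps c).foldl trieInsert (.mk .nil)) ≠ .nil := fun h =>
      hg ((buildT_nil_iff _ (norm_groupB ps c hN)).mp h)
    cases hE : isEmptyNode ((groupB ps c).foldl trieInsert (.mk .nil))
    · rfl
    · exact absurd ((isEmptyNode_iff _).mp hE) this

theorem files_eq (ps : List (List String)) (hN : PNorm ps) :
    PySem.List.sorted (((childList (chOf (ps.foldl trieInsert (.mk .nil)))).filter
        (fun kv => isEmptyNode kv.2)).map (·.1)) (fun x => x) false =
      PySem.List.sorted ((PySem.List.dedup (ps.map (fun p => p.headD ""))).filter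
        (fun c => !isFolderB ps c)) (fun x => x) false := by
  apply PySem.List.sorted_eq_sorted_of_perm _ _ _ (fun a b h => h)
  rw [List.perm_ext_iff_of_nodup (nodup_filterA ps hN (fun u => isEmptyNode u))
    (List.Nodup.filter _ (PySem.List.nodup_dedup _))]
  intro c
  rw [mem_filterA ps hN (fun u => isEmptyNode u) c, List.mem_filter, PySem.List.mem_dedup]
  show _ ↔ c ∈ headsOf ps ∧ _
  constructor
  · rintro ⟨hc, hP⟩
    refine ⟨hc, ?_⟩
    have hg : groupB ps c = [] := by
      by_contra hg
      have : chOf ((groupB ps c).foldl trieInsert (.mk .nil)) ≠ .nil := fun h =>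
        hg ((buildT_nil_iff _ (norm_groupB ps c hN)).mp h)
      exact this ((isEmptyNode_iff _).mp hP)
    simp [(groupB_eq_nil_iff ps c).mp hg]
  · rintro ⟨hc, hQ⟩
    refine ⟨hc, ?_⟩
    simp only [Bool.not_eq_true'] at hQ
    have hg : groupB ps c = [] := (groupB_eq_nil_iff ps c).mpr hQ
    rw [(isEmptyNode_iff _).mpr ((buildT_nil_iff _ (norm_groupB ps c hN)).mpr hg)]

theorem mainEq : ∀ (f : Nat) (ps : List (List String)) (pre : String), PNorm ps →
    sumLen ps < f → renderA f (ps.foldl trieInsert (.mk .nil)) pre = walkB f ps pre := by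
  intro f
  induction f with
  | zero => intro ps pre _ h; exact absurd h (Nat.not_lt_zero _)
  | succ f IH =>
    intro ps pre hN hs
    rw [trie_eta (ps.foldl trieInsert (.mk .nil))]
    simp only [renderA, walkB]
    rw [folders_eq ps hN, files_eq ps hN]
    apply PySem.List.foldl_congr_mem
    intro acc x hx
    obtain ⟨i, name⟩ := x
    have hname : name ∈ headsOf ps := by
      have h2 := List.mem_map_of_mem (f := fun q : Int × String => q.2) hx
      rw [PySem.List.map_snd_enumerate] at h2
      rcases List.mem_append.mp h2 with h | h <;>
        exact (PySem.List.mem_dedup _ _).mp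
          (List.mem_filter.mp ((PySem.List.mem_sorted _ _ _ _).mp h)).1
    have hget : getNode (chOf (ps.foldl trieInsert (.mk .nil))) name =
        (groupB ps name).foldl trieInsert (.mk .nil) := by
      rw [getNode_eq]
      rw [lookup_fold name ps (.mk .nil) hN, if_pos hname]
      simp [chOf_mk, lookupC_nil]
    have hlt := sumLen_groupB_lt ps name hN hname
    dsimp only
    rw [hget, IH (groupB ps name) _ (norm_groupB ps name hN) (by omega)]

-- ===== VERDICT (by name: the statement is the Claim_ definition above) =====
theorem display_path_tree_spec : Claim_equal_display_path_tree := by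
  intro paths root _
  unfold Spec_display_path_tree display_path_tree display_path_tree_alt
  by_cases hp : paths = []
  · simp [hp]
  · simp only [if_neg hp]
    have hfold := foldA_eq_norm paths (PTrie.mk .nil)
    rw [hfold]
    rw [mainEq ((paths.map List.length).sum + 1) (normB paths) "" (norm_normB paths)
      (by have := sumLen_normB_le paths; simp only [sumLen] at *; omega)]
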